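-- pv_equiv track=rewrite | github.com/jmnarloch/codility-python | GenomicRangeQuery.py | solution
-- ===== SOURCE A (Python) =====
-- def solution(S, P, Q):
--     # write your code in Python 2.7
--     N = len(S)
--     M = min(len(P), len(Q))
--     occurrences = [[-1 for j in range(4)] for i in range(N + 1)]
--
--     genoms = {'A': 0, 'C': 1, 'G': 2, 'T': 3}
--
--     for ind in range(1, N + 1):
--         for j in range(4):
--             occurrences[ind][j] = occurrences[ind - 1][j]
--
--         occurrences[ind][genoms[S[ind - 1]]] = ind - 1
--
--     result = [0] * M
--     for ind in range(M):
--         for j in range(4):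
--             if occurrences[Q[ind] + 1][j] >= P[ind]:
--                 result[ind] = j + 1
--                 break
--
--     return result
-- ===== SOURCE B (Python) =====
-- def solution(S, P, Q):
--     # Brute force each query directly on its slice: the answer is the smallest
--     # impact factor among the nucleotides actually occurring in S[p:q+1].
--     impact = {'A': 1, 'C': 2, 'G': 3, 'T': 4}
--     return [min(impact[c] for c in S[p:q + 1]) for p, q in zip(P, Q)]
-- ===== Notes on version B (the rewrite author's own statement) =====
-- stated objective: simpler
-- what changed: B drops A's precomputed last-occurrence table entirely and answers each query by a direct scan: the minimum impact code present in the slice S[p:q+1], via a one-line min over a dict lookup.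
-- outside the precondition, e.g. on solution('C', [-1], [0]): A returns [1], B returns [2]; on solution('AC', [3], [1]): A returns [0], B raises ValueError
import Mathlib
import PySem

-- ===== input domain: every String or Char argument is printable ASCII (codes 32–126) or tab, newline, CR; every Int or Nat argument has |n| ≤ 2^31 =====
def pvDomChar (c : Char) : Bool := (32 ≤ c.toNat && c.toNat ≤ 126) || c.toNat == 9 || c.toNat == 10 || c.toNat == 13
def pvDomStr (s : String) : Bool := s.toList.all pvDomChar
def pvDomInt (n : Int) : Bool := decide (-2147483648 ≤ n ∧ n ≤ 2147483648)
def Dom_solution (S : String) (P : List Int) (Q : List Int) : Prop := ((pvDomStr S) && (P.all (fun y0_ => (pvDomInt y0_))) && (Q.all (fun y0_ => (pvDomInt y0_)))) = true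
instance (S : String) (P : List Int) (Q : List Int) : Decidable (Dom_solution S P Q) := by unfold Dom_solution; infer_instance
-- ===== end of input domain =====

-- B drops A's precomputed last-occurrence table and answers each query by a direct min-scan
-- of the slice S[p:q+1]; equal return values on Pre_ (objective: simpler, not faster).

-- ===== PORT A =====
def pyGenoms : PySem.Dict Char Int :=
  PySem.Dict.ofList [('A', 0), ('C', 1), ('G', 2), ('T', 3)]

-- the body of A's table-building loop (one iteration, state = occurrences)
def stepA (chars : List Char) (occ : List (List Int)) (ind : Int) : List (List Int) :=
  let prev := PySem.List.pyGetD occ (ind - 1) []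
  let cur := PySem.List.pyGetD occ ind []
  let cur := (List.range 4).foldl (fun r j => r.set j (PySem.List.pyGetD prev (j : Int) (-1))) cur
  let g := pyGenoms.getD (PySem.List.pyGetD chars (ind - 1) ' ') 0
  let cur := cur.set g.toNat (ind - 1)
  occ.set ind.toNat cur

def solution (S : String) (P : List Int) (Q : List Int) : List Int :=
  let chars := S.toList
  let N : Int := (chars.length : Int)
  let M : Int := ((min P.length Q.length : Nat) : Int)
  -- occurrences = [[-1 for j in range(4)] for i in range(N+1)]
  let occ0 : List (List Int) :=
    (PySem.List.pyRange 0 (N + 1) 1).map (fun _ => (List.range 4).map (fun _ => (-1 : Int)))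
  -- for ind in range(1, N+1): copy row ind-1 into row ind, then set entry genoms[S[ind-1]] to ind-1
  let occ := (PySem.List.pyRange 1 (N + 1) 1).foldl (stepA chars) occ0
  -- result[ind] = first j+1 with occurrences[Q[ind]+1][j] >= P[ind], else 0
  (PySem.List.pyRange 0 M 1).map (fun ind =>
    let p := PySem.List.pyGetD P ind 0
    let q := PySem.List.pyGetD Q ind 0
    let row := PySem.List.pyGetD occ (q + 1) []
    match (List.range 4).find? (fun j => decide (p ≤ PySem.List.pyGetD row (j : Int) (-1))) with
    | some j => (j : Int) + 1
    | none => 0)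

-- ===== PORT B =====
def pyImpact : PySem.Dict Char Int :=
  PySem.Dict.ofList [('A', 1), ('C', 2), ('G', 3), ('T', 4)]

def solution_alt (S : String) (P : List Int) (Q : List Int) : List Int :=
  let chars := S.toList
  (P.zip Q).map (fun pq =>
    (PySem.List.min?
      ((PySem.List.slice chars (some pq.1) (some (pq.2 + 1))).map (fun c => pyImpact.getD c 0))
      (fun x => x)).getD 0)

-- ===== PRECONDITION & SPEC =====
-- Pre_ restricts to the problem's natural domain (a nucleotide string and in-range queries
-- 0 ≤ P[k] ≤ Q[k] < len(S)): outside it A raises (KeyError/IndexError) or its value comes from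
-- the -1 sentinel / negative-index wraparound, an artefact B does not reproduce (B raises
-- ValueError on an empty slice there).
def Pre_solution (S : String) (P : List Int) (Q : List Int) : Prop :=
  (S.toList.all (fun c => c == 'A' || c == 'C' || c == 'G' || c == 'T')) = true ∧
  ((P.zip Q).all (fun pq =>
    decide (0 ≤ pq.1) && decide (pq.1 ≤ pq.2) && decide (pq.2 < (S.toList.length : Int)))) = true
instance (S : String) (P : List Int) (Q : List Int) : Decidable (Pre_solution S P Q) := by
  unfold Pre_solution; infer_instance

def pvWitness_solution : String × List Int × List Int := ("AC", [0, 1], [1, 1])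

def Spec_solution (S : String) (P : List Int) (Q : List Int) (out : List Int) : Prop := out = solution_alt S P Q
instance (S : String) (P : List Int) (Q : List Int) (out : List Int) : Decidable (Spec_solution S P Q out) := by unfold Spec_solution; infer_instance

-- ===== CLAIM (what is proved, stated in full; the proofs are below) =====
def Claim_equal_solution : Prop := ∀ (S : String) (P : List Int) (Q : List Int), Dom_solution S P Q → Pre_solution S P Q → Spec_solution S P Q (solution S P Q)

-- ===== LEMMAS AND PROOFS =====

-- nucleotide code of a character (A/C/G/T ↦ 0/1/2/3)
def nucIdx (c : Char) : Nat :=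
  if c = 'A' then 0 else if c = 'C' then 1 else if c = 'G' then 2 else 3

-- index (or -1) of the last occurrence of nucleotide j among the first i characters
def lastVal (chars : List Char) (j : Nat) : Nat → Int
  | 0 => -1
  | i + 1 => if nucIdx (chars.getD i 'A') = j then (i : Int) else lastVal chars j i

def lastRow (chars : List Char) (i : Nat) : List Int :=
  [lastVal chars 0 i, lastVal chars 1 i, lastVal chars 2 i, lastVal chars 3 i]

-- A's table after processing positions 1..k
def occT (chars : List Char) (k : Nat) : List (List Int) :=
  (List.range (chars.length + 1)).map
    (fun i => if i ≤ k then lastRow chars i else [-1, -1, -1, -1])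

theorem lastRow_zero (chars : List Char) : lastRow chars 0 = [-1, -1, -1, -1] := by
  simp [lastRow, lastVal]

theorem nucIdx_lt_four (c : Char) : nucIdx c < 4 := by
  unfold nucIdx; split_ifs <;> omega

theorem genoms_getD (c : Char) (h : c = 'A' ∨ c = 'C' ∨ c = 'G' ∨ c = 'T') :
    pyGenoms.getD c 0 = (nucIdx c : Int) := by
  rcases h with h | h | h | h <;> subst h <;> decide

theorem impact_getD (c : Char) (h : c = 'A' ∨ c = 'C' ∨ c = 'G' ∨ c = 'T') :
    pyImpact.getD c 0 = (nucIdx c : Int) + 1 := by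
  rcases h with h | h | h | h <;> subst h <;> decide

theorem lastRow_succ (chars : List Char) (k : Nat) :
    lastRow chars (k + 1) = (lastRow chars k).set (nucIdx (chars.getD k 'A')) (k : Int) := by
  have h4 := nucIdx_lt_four (chars.getD k 'A')
  simp only [lastRow]
  rcases (by omega : nucIdx (chars.getD k 'A') = 0 ∨ nucIdx (chars.getD k 'A') = 1 ∨
      nucIdx (chars.getD k 'A') = 2 ∨ nucIdx (chars.getD k 'A') = 3) with h | h | h | h <;>
    rw [h] <;> simp only [List.getD] at h <;> simp [lastVal, h]

theorem set_occT (chars : List Char) (k : Nat) :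
    (occT chars k).set (k + 1) (lastRow chars (k + 1)) = occT chars (k + 1) := by
  apply List.ext_getElem
  · simp [occT]
  · intro i h1 h2
    simp only [occT, List.length_map, List.length_range, List.length_set] at h1 h2
    simp only [occT, List.getElem_set, List.getElem_map, List.getElem_range]
    by_cases hi : k + 1 = i
    · subst hi; simp
    · simp only [if_neg hi]
      by_cases hik : i ≤ k
      · rw [if_pos hik, if_pos (by omega)]
      · rw [if_neg hik, if_neg (by omega)]

theorem stepA_occT (chars : List Char)
    (hall : ∀ c ∈ chars, c = 'A' ∨ c = 'C' ∨ c = 'G' ∨ c = 'T')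
    (k : Nat) (hk : k < chars.length) :
    stepA chars (occT chars k) ((k : Int) + 1) = occT chars (k + 1) := by
  have hprev : PySem.List.pyGetD (occT chars k) ((k : Int) + 1 - 1) [] = lastRow chars k := by
    rw [show (k : Int) + 1 - 1 = ((k : Nat) : Int) by ring]
    rw [PySem.List.pyGetD_natCast]
    simp only [occT]
    rw [PySem.List.getD_map_range _ _ _ _ (by omega)]
    simp
  have hcur : PySem.List.pyGetD (occT chars k) ((k : Int) + 1) [] = [-1, -1, -1, -1] := by
    rw [show (k : Int) + 1 = ((k + 1 : Nat) : Int) by push_cast; ring]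
    rw [PySem.List.pyGetD_natCast]
    simp only [occT]
    rw [PySem.List.getD_map_range _ _ _ _ (by omega)]
    simp
  have hch : PySem.List.pyGetD chars ((k : Int) + 1 - 1) ' ' = chars[k] := by
    rw [show (k : Int) + 1 - 1 = ((k : Nat) : Int) by ring, PySem.List.pyGetD_natCast]
    exact List.getD_eq_getElem chars ' ' hk
  have hmem : chars[k] ∈ chars := List.getElem_mem hk
  simp only [stepA, hprev, hcur, hch]
  have hcopy : (List.range 4).foldl
      (fun r j => r.set j (PySem.List.pyGetD (lastRow chars k) (j : Int) (-1))) [-1, -1, -1, -1]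
      = lastRow chars k := by
    simp [List.range_succ, lastRow]
  rw [hcopy, genoms_getD _ (hall _ hmem)]
  rw [show ((nucIdx chars[k] : Int)).toNat = nucIdx chars[k] by simp]
  rw [show (k : Int) + 1 - 1 = ((k : Nat) : Int) by ring]
  rw [show ((k : Int) + 1).toNat = k + 1 by omega]
  have hgd : chars.getD k 'A' = chars[k] := List.getD_eq_getElem chars 'A' hk
  rw [← hgd, ← lastRow_succ]
  exact set_occT chars k

theorem occ_build (chars : List Char)
    (hall : ∀ c ∈ chars, c = 'A' ∨ c = 'C' ∨ c = 'G' ∨ c = 'T')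
    (k : Nat) (hk : k ≤ chars.length) :
    (PySem.List.pyRange 1 ((k : Int) + 1) 1).foldl (stepA chars) (occT chars 0)
      = occT chars k := by
  induction k with
  | zero => simp [PySem.List.pyRange]
  | succ k ih =>
      have h1 : (1 : Int) ≤ (k : Int) + 1 := by omega
      rw [show ((k + 1 : Nat) : Int) + 1 = ((k : Int) + 1) + 1 by push_cast; ring,
          PySem.List.pyRange_one_succ_right h1, List.foldl_append]
      rw [ih (by omega)]
      simpa using stepA_occT chars hall k (by omega)

theorem lastVal_ge_iff (chars : List Char) (j : Nat) (i : Nat) (p : Int) (hp : 0 ≤ p) :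
    (p ≤ lastVal chars j i) ↔
      ∃ t, t < i ∧ p ≤ (t : Int) ∧ nucIdx (chars.getD t 'A') = j := by
  induction i with
  | zero =>
      simp only [lastVal]
      constructor
      · intro h; omega
      · rintro ⟨t, ht, _⟩; omega
  | succ i ih =>
      simp only [lastVal]
      split_ifs with hnc
      · constructor
        · intro h; exact ⟨i, by omega, h, hnc⟩
        · rintro ⟨t, ht, hpt, _⟩
          have h1 : t ≤ i := by omega
          have h2 : (t : Int) ≤ (i : Int) := by exact_mod_cast h1
          omega
      · rw [ih]
        constructor
        · rintro ⟨t, ht, hpt, hn⟩; exact ⟨t, by omega, hpt, hn⟩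
        · rintro ⟨t, ht, hpt, hn⟩
          refine ⟨t, ?_, hpt, hn⟩
          rcases Nat.lt_succ_iff_lt_or_eq.mp ht with h | h
          · exact h
          · subst h; exact absurd hn hnc

-- membership in the query slice, as an index condition
theorem mem_seg_iff (chars : List Char) (a b : Nat) (hb : b ≤ chars.length) (c : Char) :
    (c ∈ (chars.drop a).take (b - a)) ↔
      ∃ t, a ≤ t ∧ t < b ∧ chars.getD t 'A' = c := by
  constructor
  · intro hc
    rw [List.mem_iff_getElem] at hc
    obtain ⟨u, hu, hcu⟩ := hc
    have hlen : ((chars.drop a).take (b - a)).length = min (b - a) (chars.length - a) := by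
      simp
    rw [hlen] at hu
    refine ⟨a + u, by omega, by omega, ?_⟩
    rw [List.getElem_take, List.getElem_drop] at hcu
    rw [List.getD_eq_getElem chars 'A' (by omega)]
    simpa using hcu
  · rintro ⟨t, hat, htb, hct⟩
    rw [List.mem_iff_getElem]
    refine ⟨t - a, by simp; omega, ?_⟩
    rw [List.getElem_take, List.getElem_drop]
    rw [List.getD_eq_getElem chars 'A' (by omega)] at hct
    simpa [Nat.add_sub_cancel' hat] using hct

-- the per-query equality: A's table lookup = B's slice minimum
theorem query_eq (chars : List Char)
    (hall : ∀ c ∈ chars, c = 'A' ∨ c = 'C' ∨ c = 'G' ∨ c = 'T')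
    (p q : Int) (hp : 0 ≤ p) (hpq : p ≤ q) (hq : q < (chars.length : Int)) :
    (match (List.range 4).find? (fun j =>
        decide (p ≤ PySem.List.pyGetD
          (PySem.List.pyGetD (occT chars chars.length) (q + 1) []) (j : Int) (-1))) with
     | some j => (j : Int) + 1
     | none => 0) =
    (PySem.List.min?
      ((PySem.List.slice chars (some p) (some (q + 1))).map (fun c => pyImpact.getD c 0))
      (fun x => x)).getD 0 := by
  have hrow : PySem.List.pyGetD (occT chars chars.length) (q + 1) []
      = lastRow chars (q.toNat + 1) := by
    rw [show q + 1 = ((q.toNat + 1 : Nat) : Int) by omega, PySem.List.pyGetD_natCast]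
    simp only [occT]
    rw [PySem.List.getD_map_range _ _ _ _ (by omega)]
    rw [if_pos (by omega)]
  have hslice : PySem.List.slice chars (some p) (some (q + 1))
      = (chars.drop p.toNat).take (q.toNat + 1 - p.toNat) := by
    rw [PySem.List.slice_toNat chars hp (by omega)]
    congr 1
    omega
  set seg := (chars.drop p.toNat).take (q.toNat + 1 - p.toNat) with hseg
  have hsub : ∀ c ∈ seg, c ∈ chars := fun c hc =>
    List.mem_of_mem_drop (List.mem_of_mem_take hc)
  have hmap : seg.map (fun c => pyImpact.getD c 0)
      = seg.map (fun c => (nucIdx c : Int) + 1) :=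
    List.map_congr_left (fun c hc => impact_getD c (hall c (hsub c hc)))
  have hne : seg ≠ [] := by
    rw [hseg, ← List.length_pos_iff]
    simp only [List.length_take, List.length_drop]
    omega
  rw [hrow, hslice, hmap]
  obtain ⟨m, hm⟩ : ∃ m, PySem.List.min? (seg.map (fun c => (nucIdx c : Int) + 1))
      (fun x => x) = some m := by
    cases h : PySem.List.min? (seg.map (fun c => (nucIdx c : Int) + 1)) (fun x => x) with
    | none => exact absurd ((PySem.List.min?_eq_none_iff _ _).mp h) (by simp [hne])
    | some m => exact ⟨m, rfl⟩
  obtain ⟨c0, hc0, hc0m⟩ := List.mem_map.mp (PySem.List.min?_mem hm)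
  have hmin := PySem.List.min?_isMin hm
  set j0 := nucIdx c0 with hj0
  have hminj : ∀ c ∈ seg, j0 ≤ nucIdx c := by
    intro c hc
    have := hmin _ (List.mem_map.mpr ⟨c, hc, rfl⟩)
    simp only at this
    rw [← hc0m] at this
    exact_mod_cast (by omega : (j0 : Int) ≤ (nucIdx c : Int))
  have hPiff : ∀ j : Nat, (p ≤ lastVal chars j (q.toNat + 1)) ↔ ∃ c ∈ seg, nucIdx c = j := by
    intro j
    rw [lastVal_ge_iff chars j _ p hp]
    constructor
    · rintro ⟨t, ht, hpt, hn⟩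
      refine ⟨chars.getD t 'A', (mem_seg_iff chars p.toNat (q.toNat + 1) (by omega) _).mpr
        ⟨t, by omega, ht, rfl⟩, hn⟩
    · rintro ⟨c, hc, hn⟩
      obtain ⟨t, hat, htb, hct⟩ := (mem_seg_iff chars p.toNat (q.toNat + 1) (by omega) c).mp hc
      exact ⟨t, htb, by omega, by rw [hct]; exact hn⟩
  have hP0 : p ≤ lastVal chars j0 (q.toNat + 1) := (hPiff j0).mpr ⟨c0, hc0, rfl⟩
  have hPlt : ∀ j, j < j0 → ¬ (p ≤ lastVal chars j (q.toNat + 1)) := by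
    intro j hj hP
    obtain ⟨c, hc, hn⟩ := (hPiff j).mp hP
    have := hminj c hc
    omega
  have h4 : j0 < 4 := nucIdx_lt_four c0
  have hm' : m = (j0 : Int) + 1 := hc0m.symm
  rw [hm, Option.getD_some, hm']
  interval_cases j0
  · simp [List.range_succ, hP0, lastRow, List.getD, PySem.List.pyGetD_ofNat']
  · have h0 := hPlt 0 (by omega)
    simp [List.range_succ, hP0, h0, lastRow, List.getD, PySem.List.pyGetD_ofNat']
  · have h0 := hPlt 0 (by omega)
    have h1 := hPlt 1 (by omega)
    simp [List.range_succ, hP0, h0, h1, lastRow, List.getD, PySem.List.pyGetD_ofNat']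
  · have h0 := hPlt 0 (by omega)
    have h1 := hPlt 1 (by omega)
    have h2 := hPlt 2 (by omega)
    simp [List.range_succ, hP0, h0, h1, h2, lastRow, List.getD, PySem.List.pyGetD_ofNat']

theorem occT_zero (chars : List Char) :
    (List.range (chars.length + 1)).map (fun _ => (List.range 4).map (fun _ => (-1 : Int)))
      = occT chars 0 := by
  unfold occT
  apply List.map_congr_left
  intro i _
  split_ifs with h
  · rw [Nat.le_zero.mp h, lastRow_zero]; decide
  · decide

-- ===== VERDICT (by name: the statement is the Claim_ definition above) =====
theorem solution_spec : Claim_equal_solution := by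
  intro S P Q _ hpre
  obtain ⟨hall', hpq'⟩ := hpre
  have hall : ∀ c ∈ S.toList, c = 'A' ∨ c = 'C' ∨ c = 'G' ∨ c = 'T' := by
    intro c hc
    have := List.all_eq_true.mp hall' c hc
    simp only [Bool.or_eq_true, beq_iff_eq] at this
    tauto
  have hpq : ∀ pq ∈ P.zip Q, 0 ≤ pq.1 ∧ pq.1 ≤ pq.2 ∧ pq.2 < (S.toList.length : Int) := by
    intro pq hm
    have := List.all_eq_true.mp hpq' pq hm
    simp only [Bool.and_eq_true, decide_eq_true_eq] at this
    exact ⟨this.1.1, this.1.2, this.2⟩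
  unfold Spec_solution
  set chars := S.toList with hch
  have hocc : (PySem.List.pyRange 1 ((chars.length : Int) + 1) 1).foldl (stepA chars)
      ((PySem.List.pyRange 0 ((chars.length : Int) + 1) 1).map
        (fun _ => (List.range 4).map (fun _ => (-1 : Int)))) = occT chars chars.length := by
    rw [show ((chars.length : Int) + 1) = ((chars.length + 1 : Nat) : Int) by push_cast; ring,
        PySem.List.pyRange_zero_natCast, List.map_map]
    rw [show ((fun _ => (List.range 4).map (fun _ => (-1 : Int))) ∘ (fun k : Nat => (k : Int)))
        = (fun _ : Nat => (List.range 4).map (fun _ => (-1 : Int))) from rfl]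
    rw [occT_zero]
    rw [show ((chars.length + 1 : Nat) : Int) = (chars.length : Int) + 1 by push_cast; ring]
    exact occ_build chars hall chars.length le_rfl
  simp only [solution, solution_alt, ← hch, hocc]
  apply List.ext_getElem
  · simp
    omega
  · intro k h1 h2
    simp only [PySem.List.pyRange_zero_natCast, List.map_map, List.length_map,
      List.length_range] at h1
    simp only [List.length_map, List.length_zip] at h2
    simp only [PySem.List.pyRange_zero_natCast, List.map_map, List.getElem_map,
      List.getElem_range, List.getElem_zip, Function.comp]
    have hkP : k < P.length := by omega
    have hkQ : k < Q.length := by omega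
    rw [PySem.List.pyGetD_natCast, PySem.List.pyGetD_natCast,
        List.getD_eq_getElem P 0 hkP, List.getD_eq_getElem Q 0 hkQ]
    have hmem : (P[k], Q[k]) ∈ P.zip Q := by
      rw [← List.getElem_zip (h := by simp; omega)]
      exact List.getElem_mem _
    obtain ⟨hb1, hb2, hb3⟩ := hpq _ hmem
    exact query_eq chars hall P[k] Q[k] hb1 hb2 hb3
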